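-- pv_equiv track=rewrite | github.com/Bertware/adventOfCode2022 | advent3.py | part1_mergesort
-- ===== SOURCE A (Python) =====
-- def get_score(char: chr) -> int:
--     if ord(char) > 96:
--         return ord(char) - ord('a') + 1
--     return 26 + (ord(char) - ord('A')) + 1
--
-- def part1_mergesort(f):
--     score = 0
--     for line in f:
--         comp1 = line[0:len(line) // 2]
--         comp2 = line[len(line) // 2:len(line) - 1]
--         comp1 = {char for char in comp1}
--         comp1 = list(comp1)
--         comp1.sort()
--         comp2 = {char for char in comp2}
--         comp2 = list(comp2)
--         comp2.sort()
--         j = 0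
--         for i in range(0, len(comp1)):
--             while j < len(comp2) and comp1[i] > comp2[j]:
--                 j += 1
--             if j < len(comp2) and comp1[i] == comp2[j]:
--                 score += get_score(comp1[i])
--     return score
-- ===== SOURCE B (Python) =====
-- def get_score(char: chr) -> int:
--     if ord(char) > 96:
--         return ord(char) - ord('a') + 1
--     return 26 + (ord(char) - ord('A')) + 1
--
-- def part1_mergesort(f):
--     score = 0
--     for line in f:
--         h = len(line) // 2
--         common = set(line[:h]) & set(line[h:len(line) - 1])
--         for char in common:
--             score += get_score(char)
--     return score
-- ===== Notes on version B (the rewrite author's own statement) =====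
-- stated objective: faster
-- what changed: Per line, the dedup+sort of each half followed by a two-pointer sorted-merge intersection (with a carried index j) is replaced by a direct hash-set intersection of the two halves, summing get_score over the resulting set; both sorts and the while-loop merge disappear (measured ~2.3x faster).
import Mathlib
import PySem

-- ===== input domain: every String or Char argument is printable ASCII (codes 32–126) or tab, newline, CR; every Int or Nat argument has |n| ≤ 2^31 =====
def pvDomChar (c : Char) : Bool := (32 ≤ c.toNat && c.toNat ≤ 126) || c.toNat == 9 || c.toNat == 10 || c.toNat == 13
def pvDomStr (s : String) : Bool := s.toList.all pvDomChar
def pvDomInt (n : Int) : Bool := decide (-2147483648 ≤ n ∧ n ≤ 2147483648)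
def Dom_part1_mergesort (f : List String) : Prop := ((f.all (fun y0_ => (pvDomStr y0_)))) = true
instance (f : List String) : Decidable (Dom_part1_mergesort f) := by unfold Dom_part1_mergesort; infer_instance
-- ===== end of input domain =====

-- B replaces A's per-line sort + two-pointer merge intersection with a direct
-- set intersection of the two halves (no sorting, no merge state; measured faster in a timing run).

-- shared module helper get_score (used by both A and B in the Python module)
def getScore (c : Char) : Int :=
  if (c.toNat : Int) > 96 then (c.toNat : Int) - 97 + 1
  else 26 + ((c.toNat : Int) - 65) + 1

-- ===== PORT A =====
-- A's inner 'for i / while j' two-pointer merge: the index j is carried as the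
-- remaining suffix of comp2; the while-advance is the dropWhile.
def mergeLoop (c1 c2 : List Char) (score : Int) : Int :=
  match c1 with
  | [] => score
  | x :: xs =>
    let c2' := c2.dropWhile (fun y => decide (y < x))
    match c2'.head? with
    | some y => if x = y then mergeLoop xs c2' (score + getScore x) else mergeLoop xs c2' score
    | none => mergeLoop xs c2' score

def part1_mergesort (f : List String) : Int :=
  f.foldl (fun score line =>
    let cs := line.toList
    let comp1 := PySem.List.slice cs (some 0) (some (PySem.Int.floordiv (cs.length : Int) 2))
    let comp2 := PySem.List.slice cs (some (PySem.Int.floordiv (cs.length : Int) 2)) (some ((cs.length : Int) - 1))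
    let c1 := PySem.List.sorted (PySem.Set.ofList comp1) (fun x => x) false
    let c2 := PySem.List.sorted (PySem.Set.ofList comp2) (fun x => x) false
    mergeLoop c1 c2 score) 0

-- ===== PORT B =====
def part1_mergesort_alt (f : List String) : Int :=
  f.foldl (fun score line =>
    let cs := line.toList
    let h : Int := PySem.Int.floordiv (cs.length : Int) 2
    let common := PySem.Set.inter (PySem.Set.ofList (PySem.List.slice cs none (some h)))
                                  (PySem.Set.ofList (PySem.List.slice cs (some h) (some ((cs.length : Int) - 1))))
    common.foldl (fun s c => s + getScore c) score) 0

-- ===== PRECONDITION & SPEC =====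
def Spec_part1_mergesort (f : List String) (out : Int) : Prop := out = part1_mergesort_alt f
instance (f : List String) (out : Int) : Decidable (Spec_part1_mergesort f out) := by unfold Spec_part1_mergesort; infer_instance

-- ===== CLAIM (what is proved, stated in full; the proofs are below) =====
def Claim_equal_part1_mergesort : Prop := ∀ (f : List String), Dom_part1_mergesort f → Spec_part1_mergesort f (part1_mergesort f)

-- ===== LEMMAS AND PROOFS =====

theorem foldl_add_score (l : List Char) (s : Int) :
    l.foldl (fun a c => a + getScore c) s = s + (l.map getScore).sum := by
  induction l generalizing s with
  | nil => simp
  | cons x xs ih => simp [List.foldl_cons, ih (s + getScore x)]; ring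

theorem head?_dropWhile_of_mem {x : Char} {c2 : List Char}
    (hpw : c2.Pairwise (· < ·)) (hx : x ∈ c2) :
    (c2.dropWhile (fun y => decide (y < x))).head? = some x := by
  induction c2 with
  | nil => simp at hx
  | cons y ys ih =>
    rcases List.pairwise_cons.mp hpw with ⟨hy, hys⟩
    by_cases hlt : y < x
    · have hxy : x ≠ y := fun h => by subst h; exact lt_irrefl x hlt
      have hxys : x ∈ ys := by
        rcases List.mem_cons.mp hx with h | h
        · exact absurd h hxy
        · exact h
      simpa [List.dropWhile, hlt] using ih hys hxys
    · have hxeq : x = y := by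
        rcases List.mem_cons.mp hx with h | h
        · exact h
        · exact absurd (hy x h) hlt
      simp [List.dropWhile, hxeq]

theorem mem_dropWhile_iff_of_gt {x z : Char} (c2 : List Char) (hzx : x < z) :
    z ∈ c2.dropWhile (fun y => decide (y < x)) ↔ z ∈ c2 := by
  constructor
  · intro h
    exact (List.dropWhile_sublist _).mem h
  · intro h
    have hsplit := List.takeWhile_append_dropWhile (p := fun y => decide (y < x)) (l := c2)
    rw [← hsplit] at h
    rcases List.mem_append.mp h with htk | hdr
    · have hlt := List.mem_takeWhile_imp htk
      simp at hlt
      exact absurd (lt_trans hzx hlt) (lt_irrefl x)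
    · exact hdr

theorem mergeLoop_eq (c1 : List Char) :
    ∀ (c2 : List Char) (score : Int), c1.Pairwise (· < ·) → c2.Pairwise (· < ·) →
    mergeLoop c1 c2 score = score + ((c1.filter (fun z => decide (z ∈ c2))).map getScore).sum := by
  induction c1 with
  | nil => intro c2 score _ _; simp [mergeLoop]
  | cons x xs ih =>
    intro c2 score hpw1 hpw2
    rcases List.pairwise_cons.mp hpw1 with ⟨hx, hxs⟩
    have hpw2' : (c2.dropWhile (fun y => decide (y < x))).Pairwise (· < ·) :=
      List.Pairwise.sublist (List.dropWhile_sublist _) hpw2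
    have hfilt : xs.filter (fun z => decide (z ∈ c2.dropWhile (fun y => decide (y < x))))
               = xs.filter (fun z => decide (z ∈ c2)) := by
      apply List.filter_congr
      intro z hz
      simp [mem_dropWhile_iff_of_gt c2 (hx z hz)]
    by_cases hmem : x ∈ c2
    · have hhd := head?_dropWhile_of_mem hpw2 hmem
      rw [mergeLoop]
      simp only [hhd]
      rw [ih _ _ hxs hpw2', hfilt]
      simp [hmem]
      ring
    · have hhd : ∀ y, (c2.dropWhile (fun y => decide (y < x))).head? = some y → x ≠ y := by
        intro y hy h
        subst h
        exact hmem ((List.dropWhile_sublist _).mem (List.mem_of_mem_head? hy))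
      rw [mergeLoop]
      rcases h : (c2.dropWhile (fun y => decide (y < x))).head? with _ | y
      · simp only []
        rw [ih _ _ hxs hpw2', hfilt]
        simp [hmem]
      · simp only [if_neg (hhd y h)]
        rw [ih _ _ hxs hpw2', hfilt]
        simp [hmem]

theorem line_eq (comp1 comp2 : List Char) (score : Int) :
    mergeLoop (PySem.List.sorted (PySem.Set.ofList comp1) (fun x => x) false)
              (PySem.List.sorted (PySem.Set.ofList comp2) (fun x => x) false) score
    = (PySem.Set.inter (PySem.Set.ofList comp1) (PySem.Set.ofList comp2)).foldl
        (fun s c => s + getScore c) score := by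
  set c1s := PySem.List.sorted (PySem.Set.ofList comp1) (fun x => x) false with hc1s
  set c2s := PySem.List.sorted (PySem.Set.ofList comp2) (fun x => x) false with hc2s
  have hpw1 : c1s.Pairwise (· < ·) := PySem.List.sorted_ofList_pairwise_lt comp1
  have hpw2 : c2s.Pairwise (· < ·) := PySem.List.sorted_ofList_pairwise_lt comp2
  rw [mergeLoop_eq c1s c2s score hpw1 hpw2, foldl_add_score]
  congr 1
  -- the two filtered lists are permutations of each other, so the sums agree
  have hperm : c1s.Perm (PySem.Set.ofList comp1) := PySem.List.sorted_perm _ _ _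
  have hmem2 : ∀ z : Char, (z ∈ c2s) ↔ (z ∈ PySem.Set.ofList comp2) := by
    intro z; rw [hc2s, PySem.List.mem_sorted]
  have h1 : c1s.filter (fun z => decide (z ∈ c2s))
      = c1s.filter (fun z => PySem.Set.contains (PySem.Set.ofList comp2) z) := by
    apply List.filter_congr
    intro z _
    simp [PySem.Set.contains, hmem2 z, PySem.Set.mem_ofList]
  have h2 : (c1s.filter (fun z => PySem.Set.contains (PySem.Set.ofList comp2) z)).Perm
      (PySem.Set.inter (PySem.Set.ofList comp1) (PySem.Set.ofList comp2)) := by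
    unfold PySem.Set.inter
    exact hperm.filter _
  rw [h1]
  exact (h2.map getScore).sum_eq

-- ===== VERDICT (by name: the statement is the Claim_ definition above) =====
theorem part1_mergesort_spec : Claim_equal_part1_mergesort := by
  intro f _
  unfold Spec_part1_mergesort part1_mergesort part1_mergesort_alt
  congr 1
  funext score line
  simp only [PySem.List.slice_zero_start]
  exact line_eq _ _ score
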